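-- pv_equiv track=rewrite | github.com/RevanthNandamuri1341b0/PYTHON-COMPY | completecell.py | cell_compete
-- ===== SOURCE A (Python) =====
-- def cell_compete(states, days):
--     def new_state(in_states):
--         new_state = []
--         for i in range(len(in_states)):
--             if i == 0:
--                 group = [0, in_states[0], in_states[1]]
--             elif i == len(in_states) - 1:
--                 group = [in_states[i - 1], in_states[i], 0]
--             else:
--                 group = [in_states[i - 1], in_states[i], in_states[i + 1]]
--             new_state.append(0 if group[0] == group[2] else 1)
--         return new_state
--
--     state = None
--     j = 0
--     while j < days:
--         if not state:
--             state = new_state(states)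
--         else:
--             state = new_state(state)
--         j += 1
--     return state
-- ===== SOURCE B (Python) =====
-- def cell_compete(states, days):
--     # Cycle detection: Rule-90-style states repeat; once a repeated state is
--     # seen, jump ahead by (remaining days) mod period instead of simulating.
--     n = len(states)
--
--     def step(s):
--         return [0 if (s[i - 1] if i >= 1 else 0) == (s[i + 1] if i + 1 < n else 0) else 1
--                 for i in range(n)]
--
--     if days <= 0:
--         return list(states)
--     s = step(states)
--     d = 1
--     seen = {tuple(s): 1}
--     while d < days:
--         s = step(s)
--         d += 1
--         key = tuple(s)
--         if key in seen:
--             period = d - seen[key]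
--             rem = (days - d) % period
--             for _ in range(rem):
--                 s = step(s)
--             return s
--         seen[key] = d
--     return s
-- ===== Notes on version B (the rewrite author's own statement) =====
-- stated objective: faster
-- what changed: B detects a repeated state with a hash table over the state sequence and jumps ahead by the remaining days modulo the detected period instead of simulating every day.
-- outside the precondition, e.g. on cell_compete([3, 1, 2], 0): A returns None, B returns [3, 1, 2]; on cell_compete([5], 2): A raises IndexError, B returns [0]
import Mathlib
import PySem

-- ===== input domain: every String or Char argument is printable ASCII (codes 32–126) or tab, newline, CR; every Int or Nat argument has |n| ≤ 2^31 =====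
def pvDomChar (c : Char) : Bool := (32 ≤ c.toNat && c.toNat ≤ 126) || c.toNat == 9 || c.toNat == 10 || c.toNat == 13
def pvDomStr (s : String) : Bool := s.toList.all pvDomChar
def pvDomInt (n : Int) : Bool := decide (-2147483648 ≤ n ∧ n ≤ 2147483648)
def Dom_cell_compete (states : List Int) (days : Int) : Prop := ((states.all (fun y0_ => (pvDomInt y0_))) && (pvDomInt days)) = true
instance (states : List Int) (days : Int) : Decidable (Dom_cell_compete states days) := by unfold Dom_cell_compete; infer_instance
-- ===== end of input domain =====

-- B replaces A's day-by-day simulation with cycle detection on the sequence of states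
-- (jumping ahead by the remaining days modulo the detected period); equivalence is
-- proved for days ≥ 1 and len(states) ≠ 1 (outside that A raises or returns None).

-- ===== PORT A =====
-- new_state: indexing ported via pyGet? + getD 0; inside Pre_ (length ≠ 1) every
-- index the Python actually evaluates is in range, so the default is never consulted.
def newStateA (s : List Int) : List Int :=
  (PySem.List.pyRange 0 (s.length : Int) 1).foldl (fun acc i =>
    let group : List Int :=
      if i = 0 then
        [0, (PySem.List.pyGet? s 0).getD 0, (PySem.List.pyGet? s 1).getD 0]
      else if i = (s.length : Int) - 1 then
        [(PySem.List.pyGet? s (i - 1)).getD 0, (PySem.List.pyGet? s i).getD 0, 0]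
      else
        [(PySem.List.pyGet? s (i - 1)).getD 0, (PySem.List.pyGet? s i).getD 0,
         (PySem.List.pyGet? s (i + 1)).getD 0]
    acc ++ [if (PySem.List.pyGet? group 0).getD 0 = (PySem.List.pyGet? group 2).getD 0
            then (0 : Int) else 1]) []

-- the `while j < days` loop; state is None before the first iteration, and Python's
-- `if not state` is true for None and for the empty list
def loopA : Nat → Option (List Int) → List Int → Option (List Int)
  | 0, state, _ => state
  | fuel + 1, state, states =>
      let next : List Int :=
        match state with
        | none => newStateA states
        | some s => if s = [] then newStateA states else newStateA s
      loopA fuel (some next) states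

-- for days ≤ 0 Python A returns None, which is outside Pre_; the port returns [] there
def cell_compete (states : List Int) (days : Int) : List Int :=
  (loopA days.toNat none states).getD []

-- ===== PORT B =====
-- B's step comprehension (n = len(states), captured by the Python closure)
def stepB (n : Int) (s : List Int) : List Int :=
  (PySem.List.pyRange 0 n 1).map (fun i =>
    if (if 1 ≤ i then (PySem.List.pyGet? s (i - 1)).getD 0 else 0)
       = (if i + 1 < n then (PySem.List.pyGet? s (i + 1)).getD 0 else 0)
    then (0 : Int) else 1)

-- `for _ in range(rem): s = step(s)`
def repStepB (n : Int) : Nat → List Int → List Int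
  | 0, s => s
  | k + 1, s => repStepB n k (stepB n s)

-- the `while d < days` loop with the seen dictionary; fuel = days - d
def loopB (n days : Int) : Nat → List Int → Int → PySem.Dict (List Int) Int → List Int
  | 0, s, _, _ => s
  | fuel + 1, s, d, seen =>
      let s' := stepB n s
      let d' := d + 1
      match seen.get? s' with
      | some mu =>
          let period := d' - mu
          let rem := PySem.Int.mod (days - d') period
          repStepB n rem.toNat s'
      | none => loopB n days fuel s' d' (seen.insert s' d')

def cell_compete_alt (states : List Int) (days : Int) : List Int :=
  let n : Int := states.length
  if days ≤ 0 then states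
  else
    let s := stepB n states
    loopB n days (days - 1).toNat s 1 (PySem.Dict.empty.insert s 1)

-- ===== PRECONDITION & SPEC =====
-- Pre_ excludes days ≤ 0, where A returns None (not a list), and singleton states,
-- where A raises IndexError (in_states[1] in the i == 0 branch).
def Pre_cell_compete (states : List Int) (days : Int) : Prop :=
  1 ≤ days ∧ states.length ≠ 1
instance (states : List Int) (days : Int) : Decidable (Pre_cell_compete states days) := by
  unfold Pre_cell_compete; infer_instance

def pvWitness_cell_compete : List Int × Int := ([1, 0, 2, 1], 5)

def Spec_cell_compete (states : List Int) (days : Int) (out : List Int) : Prop :=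
  out = cell_compete_alt states days
instance (states : List Int) (days : Int) (out : List Int) : Decidable (Spec_cell_compete states days out) := by
  unfold Spec_cell_compete; infer_instance

-- ===== CLAIM (what is proved, stated in full; the proofs are below) =====
def Claim_equal_cell_compete : Prop := ∀ (states : List Int) (days : Int),
  Dom_cell_compete states days → Pre_cell_compete states days →
  Spec_cell_compete states days (cell_compete states days)

-- ===== LEMMAS AND PROOFS =====

-- zero-padded neighbour lookup and the canonical one-step function both programs compute
def pvExt (s : List Int) (i : Int) : Int := if 0 ≤ i then s.getD i.toNat 0 else 0

def pvCanon (s : List Int) : List Int :=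
  (List.range s.length).map (fun (k : Nat) =>
    if pvExt s ((k : Int) - 1) = pvExt s ((k : Int) + 1) then (0 : Int) else 1)

lemma pvExt_natCast (s : List Int) (k : Nat) : pvExt s (k : Int) = s[k]?.getD 0 := by
  simp [pvExt, List.getD_eq_getElem?_getD]

lemma pvGet_natCast (s : List Int) (k : Nat) :
    (PySem.List.pyGet? s (k : Int)).getD 0 = s[k]?.getD 0 := by
  simp [PySem.List.pyGet?_natCast]

lemma newStateA_eq_canon (s : List Int) : newStateA s = pvCanon s := by
  unfold newStateA pvCanon
  rw [PySem.List.foldl_append_singleton_eq_map, List.nil_append]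
  apply List.ext_getElem
  · simp [PySem.List.length_pyRange_one]
  · intro k h1 h2
    simp only [List.getElem_map, PySem.List.getElem_pyRange_one, zero_add, List.getElem_range]
    simp [PySem.List.length_pyRange_one] at h1 h2
    by_cases hk0 : k = 0
    · subst hk0
      have e1 : pvExt s ((0:Int) - 1) = 0 := by norm_num [pvExt]
      norm_num at e1 ⊢
      rw [e1]
      have e2 : pvExt s ((0:Int) + 1) = s[1]?.getD 0 := by
        have : ((0:Int) + 1) = ((1:Nat) : Int) := by norm_num
        rw [this, pvExt_natCast]
      norm_num at e2
      rw [e2, show ((1:Int)) = ((1:Nat):Int) by norm_num, pvGet_natCast s 1]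
      norm_num [PySem.List.pyGet?, PySem.List.pyIdx?, h2, show Int.toNat 2 = 2 from rfl]
    · have hk0' : ((k:Int)) ≠ 0 := by exact_mod_cast hk0
      have ekm : ((k:Int) - 1) = ((k-1 : Nat) : Int) := by omega
      have ekp : ((k:Int) + 1) = ((k+1 : Nat) : Int) := by omega
      rw [if_neg hk0', ekm, ekp, pvExt_natCast, pvExt_natCast]
      by_cases hlast : (k:Int) = (s.length:Int) - 1
      · rw [if_pos hlast]
        have hout : s[k+1]? = none := by
          rw [List.getElem?_eq_none_iff]; omega
        rw [pvGet_natCast s (k-1), hout]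
        norm_num [PySem.List.pyGet?, PySem.List.pyIdx?, h2, show Int.toNat 2 = 2 from rfl]
      · rw [if_neg hlast, pvGet_natCast s (k-1), pvGet_natCast s (k+1)]
        norm_num [PySem.List.pyGet?, PySem.List.pyIdx?, h2, show Int.toNat 2 = 2 from rfl]

lemma stepB_eq_canon (s : List Int) : stepB (s.length : Int) s = pvCanon s := by
  unfold stepB pvCanon
  apply List.ext_getElem
  · simp [PySem.List.length_pyRange_one]
  · intro k h1 h2
    simp only [List.getElem_map, PySem.List.getElem_pyRange_one, zero_add, List.getElem_range]
    simp [PySem.List.length_pyRange_one] at h1 h2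
    have hL : ∀ _ : 1 ≤ (k:Int), (if 1 ≤ (k:Int) then (PySem.List.pyGet? s ((k:Int) - 1)).getD 0 else 0) = pvExt s ((k:Int) - 1) := by
      intro hk
      have ekm : ((k:Int) - 1) = ((k-1 : Nat) : Int) := by omega
      rw [if_pos hk, ekm, pvGet_natCast, pvExt_natCast]
    have ekp : ((k:Int) + 1) = ((k+1 : Nat) : Int) := by omega
    have hR : (if (k:Int) + 1 < (s.length:Int) then (PySem.List.pyGet? s ((k:Int) + 1)).getD 0 else 0) = pvExt s ((k:Int) + 1) := by
      by_cases hin : (k:Int) + 1 < (s.length:Int)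
      · rw [if_pos hin, ekp, pvGet_natCast, pvExt_natCast]
      · rw [if_neg hin, ekp, pvExt_natCast]
        have : s[k+1]? = none := by rw [List.getElem?_eq_none_iff]; omega
        rw [this]; rfl
    rw [hR]
    by_cases hk1 : 1 ≤ (k:Int)
    · rw [hL hk1]
    · have : k = 0 := by omega
      subst this
      rw [if_neg hk1]
      norm_num [pvExt]

lemma pvCanon_length (s : List Int) : (pvCanon s).length = s.length := by
  simp [pvCanon]

lemma pvIter_length (k : Nat) (t : List Int) : (pvCanon^[k] t).length = t.length := by
  induction k generalizing t with
  | zero => rfl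
  | succ k ih => rw [Function.iterate_succ_apply, ih, pvCanon_length]

lemma pvPer_step (y : List Int) (b p : Nat) (h : pvCanon^[b + p] y = pvCanon^[b] y) :
    ∀ j, pvCanon^[b + j + p] y = pvCanon^[b + j] y := by
  intro j
  have h2 := congrArg (pvCanon^[j]) h
  rw [← Function.iterate_add_apply, ← Function.iterate_add_apply] at h2
  rw [show b + j + p = j + (b + p) by omega, show b + j = j + b by omega]
  exact h2

lemma pvPer_mul (y : List Int) (b p : Nat) (h : pvCanon^[b + p] y = pvCanon^[b] y) :
    ∀ q j, pvCanon^[b + j + q * p] y = pvCanon^[b + j] y := by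
  intro q
  induction q with
  | zero => simp
  | succ q ih =>
      intro j
      have := pvPer_step y b p h (j + q * p)
      rw [show b + j + (q+1) * p = b + (j + q*p) + p by ring] at *
      rw [this, show b + (j + q*p) = b + j + q*p by omega, ih j]

lemma repStepB_eq (L : Nat) (r : Nat) : ∀ (t : List Int), t.length = L →
    repStepB (L : Int) r t = pvCanon^[r] t := by
  induction r with
  | zero => intro t _; rfl
  | succ r ih =>
      intro t ht
      have hstep : stepB (L : Int) t = pvCanon t := by rw [← ht]; exact stepB_eq_canon t
      rw [repStepB, hstep, ih (pvCanon t) (by rw [pvCanon_length, ht]),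
          ← Function.iterate_succ_apply]

lemma loopB_eq (L : Nat) (y : List Int) (hy : y.length = L) (days : Int) :
    ∀ (fuel : Nat) (s : List Int) (d : Int) (seen : PySem.Dict (List Int) Int),
    s = pvCanon^[(d - 1).toNat] y →
    1 ≤ d → d ≤ days → (fuel : Int) = days - d →
    (∀ t k, seen.get? t = some k → 1 ≤ k ∧ k ≤ d ∧ t = pvCanon^[(k - 1).toNat] y) →
    loopB (L : Int) days fuel s d seen = pvCanon^[(days - 1).toNat] y := by
  intro fuel
  induction fuel with
  | zero =>
      intro s d seen hs hd1 hdd hfuel _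
      have : d = days := by omega
      subst this
      exact hs
  | succ fuel ih =>
      intro s d seen hs hd1 hdd hfuel hinv
      have hdlt : d < days := by
        have : ((fuel + 1 : Nat) : Int) = days - d := hfuel
        omega
      have hslen : s.length = L := by rw [hs, pvIter_length, hy]
      have hstep : stepB (L : Int) s = pvCanon s := by rw [← hslen]; exact stepB_eq_canon s
      have hs' : stepB (L : Int) s = pvCanon^[(d + 1 - 1).toNat] y := by
        rw [hstep, hs, show (d + 1 - 1).toNat = (d - 1).toNat + 1 by omega,
            Function.iterate_succ_apply']
      rw [loopB]
      simp only
      cases hget : (seen.get? (stepB (L : Int) s)) with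
      | none =>
          apply ih _ _ _ hs' (by omega) (by omega) (by omega)
          intro t k hk
          rw [PySem.Dict.get?_insert] at hk
          split at hk
          · rename_i hts
            obtain rfl := hts
            injection hk with hk
            subst hk
            exact ⟨by omega, by omega, hs'⟩
          · obtain ⟨h1, h2, h3⟩ := hinv t k hk
            exact ⟨h1, by omega, h3⟩
      | some mu =>
          dsimp only
          obtain ⟨hmu1, hmu2, hmu3⟩ := hinv _ _ hget
          set a : Nat := (d + 1 - 1).toNat with ha
          set b : Nat := (mu - 1).toNat with hb
          have hba : b < a := by omega
          set p : Nat := a - b with hp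
          have hppos : 0 < p := by omega
          have hcol : pvCanon^[b + p] y = pvCanon^[b] y := by
            rw [show b + p = a by omega, ← hs', hmu3]
          have hper : d + 1 - mu = (p : Int) := by omega
          have hDnn : 0 ≤ days - (d + 1) := by omega
          set D : Nat := (days - (d + 1)).toNat with hD
          have hDeq : days - (d + 1) = (D : Int) := by omega
          have hrem : PySem.Int.mod (days - (d + 1)) (d + 1 - mu) = ((D % p : Nat) : Int) := by
            rw [hDeq, hper, PySem.Int.mod_natCast]
          rw [hrem]
          rw [Int.toNat_natCast]
          rw [repStepB_eq L (D % p) _ (by rw [hs', pvIter_length, hy]), hs',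
              ← Function.iterate_add_apply]
          have hgoal : (days - 1).toNat = b + (p + D % p) + (D / p) * p := by
            have h1 : D / p * p + D % p = D := Nat.div_add_mod' D p
            omega
          rw [hgoal, pvPer_mul y b p hcol (D / p) (p + D % p)]
          congr 1
          omega

lemma loopA_some (states : List Int) :
    ∀ (fuel : Nat) (s : List Int), s.length = states.length →
    loopA fuel (some s) states = some (pvCanon^[fuel] s) := by
  intro fuel
  induction fuel with
  | zero => intro s _; rfl
  | succ fuel ih =>
      intro s hlen
      rw [loopA]
      have hnext : (if s = [] then newStateA states else newStateA s) = pvCanon s := by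
        by_cases hnil : s = []
        · have : states = [] := by
            rw [← List.length_eq_zero_iff, ← hlen, hnil]; rfl
          rw [if_pos hnil, hnil, this, newStateA_eq_canon]
        · rw [if_neg hnil, newStateA_eq_canon]
      rw [hnext, ih (pvCanon s) (by rw [pvCanon_length, hlen]),
          ← Function.iterate_succ_apply]

lemma pv_main (states : List Int) (days : Int) (hd : 1 ≤ days) :
    cell_compete states days = cell_compete_alt states days := by
  have hm : days.toNat = (days - 1).toNat + 1 := by omega
  have hA : cell_compete states days = pvCanon^[(days - 1).toNat] (pvCanon states) := by
    unfold cell_compete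
    rw [hm, loopA]
    rw [newStateA_eq_canon, loopA_some states _ _ (pvCanon_length states)]
    rfl
  have hstep0 : stepB (states.length : Int) states = pvCanon states := stepB_eq_canon states
  have hB : cell_compete_alt states days = pvCanon^[(days - 1).toNat] (pvCanon states) := by
    unfold cell_compete_alt
    rw [if_neg (by omega)]
    rw [hstep0]
    apply loopB_eq states.length (pvCanon states) (pvCanon_length states) days
    · simp
    · omega
    · omega
    · omega
    · intro t k hk
      rw [PySem.Dict.get?_insert] at hk
      split at hk
      · rename_i hts
        injection hk with hk
        subst hk
        subst hts
        exact ⟨le_refl 1, le_refl 1, by simp⟩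
      · rw [PySem.Dict.get?_empty] at hk
        exact absurd hk (by simp)
  rw [hA, hB]

-- ===== VERDICT (by name: the statement is the Claim_ definition above) =====
theorem cell_compete_spec : Claim_equal_cell_compete := by
  intro states days _ hpre
  unfold Spec_cell_compete
  exact pv_main states days hpre.1
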